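-- pv_equiv track=rewrite | github.com/arturoreyes93/Credit-Card | CreditCard.py | cardbrand
-- ===== SOURCE A (Python) =====
-- def cardbrand(cardlist):
--
-- 	num=0
--
-- 	for i in range(4):
--
-- 		num=(num*10)+cardlist[i]
--
-- 	if num//100==34 or num//100==37:
--
-- 		return 'American Express'
--
-- 	elif num==6011 or (num//10==644) or (num//100==65):
--
-- 		return'Discover'
--
-- 	elif num//100==50 or num//100==55:
--
-- 		return 'Mastercard'
--
-- 	elif num//1000==4:
--
-- 		return 'Visa'
--
-- 	else:
--
-- 		return 'none'
-- ===== SOURCE B (Python) =====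
-- BRAND_RANGES = [
--     (3400, 3499, 'American Express'),
--     (3700, 3799, 'American Express'),
--     (6011, 6011, 'Discover'),
--     (6440, 6449, 'Discover'),
--     (6500, 6599, 'Discover'),
--     (5000, 5099, 'Mastercard'),
--     (5500, 5599, 'Mastercard'),
--     (4000, 4999, 'Visa'),
-- ]
--
-- def cardbrand(cardlist):
--     num = cardlist[0] * 1000 + cardlist[1] * 100 + cardlist[2] * 10 + cardlist[3]
--     for low, high, brand in BRAND_RANGES:
--         if low <= num <= high:
--             return brand
--     return 'none'
-- ===== Notes on version B (the rewrite author's own statement) =====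
-- stated objective: simpler
-- what changed: Replaces the Horner loop plus floor-division if/elif chain with a positional-weight sum and a first-match scan over a table of disjoint (low, high, brand) ranges.
import Mathlib
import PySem

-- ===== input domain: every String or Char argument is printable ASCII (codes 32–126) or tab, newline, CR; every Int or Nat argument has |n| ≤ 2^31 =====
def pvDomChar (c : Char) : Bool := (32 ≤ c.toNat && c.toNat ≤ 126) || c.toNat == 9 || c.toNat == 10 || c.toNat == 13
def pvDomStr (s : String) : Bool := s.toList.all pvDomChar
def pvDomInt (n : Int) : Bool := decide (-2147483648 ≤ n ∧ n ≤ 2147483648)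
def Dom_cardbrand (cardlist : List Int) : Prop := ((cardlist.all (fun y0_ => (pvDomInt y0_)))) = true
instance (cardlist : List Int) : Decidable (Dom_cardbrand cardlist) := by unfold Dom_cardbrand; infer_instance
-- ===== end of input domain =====

-- ===== PORT A =====
-- B replaces the Horner loop + floor-division if/elif chain by a positional-weight sum
-- and a first-match scan of a disjoint (low, high, brand) range table (objective: simpler).
def cardbrand (cardlist : List Int) : String :=
  let num : Int := (PySem.List.pyRange 0 4 1).foldl
    (fun num i => num * 10 + (PySem.List.pyGet? cardlist i).getD 0) 0
  if PySem.Int.floordiv num 100 = 34 ∨ PySem.Int.floordiv num 100 = 37 then "American Express"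
  else if num = 6011 ∨ PySem.Int.floordiv num 10 = 644 ∨ PySem.Int.floordiv num 100 = 65 then "Discover"
  else if PySem.Int.floordiv num 100 = 50 ∨ PySem.Int.floordiv num 100 = 55 then "Mastercard"
  else if PySem.Int.floordiv num 1000 = 4 then "Visa"
  else "none"

-- ===== PORT B =====
def brandRanges : List (Int × Int × String) :=
  [(3400, 3499, "American Express"), (3700, 3799, "American Express"),
   (6011, 6011, "Discover"), (6440, 6449, "Discover"), (6500, 6599, "Discover"),
   (5000, 5099, "Mastercard"), (5500, 5599, "Mastercard"),
   (4000, 4999, "Visa")]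

def scanRanges (num : Int) : List (Int × Int × String) → String
  | [] => "none"
  | (lo, hi, b) :: rest => if lo ≤ num ∧ num ≤ hi then b else scanRanges num rest

def cardbrand_alt (cardlist : List Int) : String :=
  let num : Int := (PySem.List.pyGet? cardlist 0).getD 0 * 1000
    + (PySem.List.pyGet? cardlist 1).getD 0 * 100
    + (PySem.List.pyGet? cardlist 2).getD 0 * 10
    + (PySem.List.pyGet? cardlist 3).getD 0
  scanRanges num brandRanges

-- ===== PRECONDITION & SPEC =====
-- A raises IndexError when the list has fewer than 4 elements; exactly those inputs are excluded.
def Pre_cardbrand (cardlist : List Int) : Prop := 4 ≤ cardlist.length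
instance (cardlist : List Int) : Decidable (Pre_cardbrand cardlist) := by unfold Pre_cardbrand; infer_instance
def pvWitness_cardbrand : List Int := [6, 0, 1, 1]
def Spec_cardbrand (cardlist : List Int) (out : String) : Prop := out = cardbrand_alt cardlist
instance (cardlist : List Int) (out : String) : Decidable (Spec_cardbrand cardlist out) := by unfold Spec_cardbrand; infer_instance

-- ===== CLAIM (what is proved, stated in full; the proofs are below) =====
def Claim_equal_cardbrand : Prop := ∀ (cardlist : List Int), Dom_cardbrand cardlist → Pre_cardbrand cardlist → Spec_cardbrand cardlist (cardbrand cardlist)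

-- ===== LEMMAS AND PROOFS =====

-- the if/elif chain of A agrees with the range-table scan of B for every Int
set_option maxHeartbeats 1000000 in
theorem chain_eq_scan (num : Int) :
    (if PySem.Int.floordiv num 100 = 34 ∨ PySem.Int.floordiv num 100 = 37 then "American Express"
     else if num = 6011 ∨ PySem.Int.floordiv num 10 = 644 ∨ PySem.Int.floordiv num 100 = 65 then "Discover"
     else if PySem.Int.floordiv num 100 = 50 ∨ PySem.Int.floordiv num 100 = 55 then "Mastercard"
     else if PySem.Int.floordiv num 1000 = 4 then "Visa"
     else "none") = scanRanges num brandRanges := by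
  have e10 : ∀ a : Int, PySem.Int.floordiv a 10 = a / 10 :=
    fun a => PySem.Int.floordiv_eq_ediv_of_pos (by norm_num)
  have e100 : ∀ a : Int, PySem.Int.floordiv a 100 = a / 100 :=
    fun a => PySem.Int.floordiv_eq_ediv_of_pos (by norm_num)
  have e1000 : ∀ a : Int, PySem.Int.floordiv a 1000 = a / 1000 :=
    fun a => PySem.Int.floordiv_eq_ediv_of_pos (by norm_num)
  simp only [brandRanges, scanRanges, e10, e100, e1000]
  split_ifs <;> first | rfl | omega

theorem cardbrand_spec' (a b c d : Int) (rest : List Int) :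
    cardbrand (a :: b :: c :: d :: rest) = cardbrand_alt (a :: b :: c :: d :: rest) := by
  have hr : PySem.List.pyRange 0 4 1 = [0, 1, 2, 3] := by decide
  have g0 : PySem.List.pyGet? (a :: b :: c :: d :: rest) 0 = some a := by
    simp only [PySem.List.pyGet?, PySem.List.pyIdx?]
    norm_num
    rw [if_pos (by omega)]
    simp
  have g1 : PySem.List.pyGet? (a :: b :: c :: d :: rest) 1 = some b := by
    simp only [PySem.List.pyGet?, PySem.List.pyIdx?]
    norm_num
    rw [if_pos (by omega)]
    simp
  have g2 : PySem.List.pyGet? (a :: b :: c :: d :: rest) 2 = some c := by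
    simp only [PySem.List.pyGet?, PySem.List.pyIdx?]
    norm_num
    rw [if_pos (by omega)]
    simp
  have g3 : PySem.List.pyGet? (a :: b :: c :: d :: rest) 3 = some d := by
    simp only [PySem.List.pyGet?, PySem.List.pyIdx?]
    norm_num
    rw [if_pos (by omega)]
    simp
  simp only [cardbrand, cardbrand_alt, hr, List.foldl, g0, g1, g2, g3, Option.getD_some]
  rw [show ((((0 * 10 + a) * 10 + b) * 10 + c) * 10 + d) = a * 1000 + b * 100 + c * 10 + d by ring]
  exact chain_eq_scan _

-- ===== VERDICT (by name: the statement is the Claim_ definition above) =====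
theorem cardbrand_spec : Claim_equal_cardbrand := by
  intro cardlist _ hpre
  match cardlist, hpre with
  | a :: b :: c :: d :: rest, _ =>
    exact cardbrand_spec' a b c d rest
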